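-- pv_equiv track=rewrite | github.com/FrancisCrickInstitute/asf-tools | asf_tools/ssh/file_object.py | _parse_permissions
-- ===== SOURCE A (Python) =====
-- def _parse_permissions(permissions):
--     permission_map = {
--         'r': 'read',
--         'w': 'write',
--         'x': 'execute',
--         '-': 'none'
--     }
--     parsed_permissions = {
--         'user': [permission_map[perm] for perm in permissions[1:4]],
--         'group': [permission_map[perm] for perm in permissions[4:7]],
--         'others': [permission_map[perm] for perm in permissions[7:10]]
--     }
--     return parsed_permissions
-- ===== SOURCE B (Python) =====
-- def _parse_permissions(permissions):
--     words = {'r': 'read', 'w': 'write', 'x': 'execute', '-': 'none'}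
--     buckets = ('user', 'group', 'others')
--     parsed_permissions = {'user': [], 'group': [], 'others': []}
--     i = 0
--     for ch in permissions[1:10]:
--         parsed_permissions[buckets[i // 3]].append(words[ch])
--         i += 1
--     return parsed_permissions
-- ===== Notes on version B (the rewrite author's own statement) =====
-- stated objective: alternative
-- what changed: Replaces A's three independent slice-then-map comprehensions with a single accumulating loop over permissions[1:10] that dispatches each mapped word into the user/group/others bucket chosen by i // 3.
import Mathlib
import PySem

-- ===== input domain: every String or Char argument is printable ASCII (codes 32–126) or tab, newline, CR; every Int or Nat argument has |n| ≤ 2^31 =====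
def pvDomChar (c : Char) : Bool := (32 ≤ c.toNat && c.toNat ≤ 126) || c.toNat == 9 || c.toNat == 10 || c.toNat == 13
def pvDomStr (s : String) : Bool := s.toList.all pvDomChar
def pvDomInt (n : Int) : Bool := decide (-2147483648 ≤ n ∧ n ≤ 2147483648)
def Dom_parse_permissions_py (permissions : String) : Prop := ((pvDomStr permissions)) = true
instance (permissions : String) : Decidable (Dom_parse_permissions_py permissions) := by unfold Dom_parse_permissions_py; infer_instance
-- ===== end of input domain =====

-- B builds the three buckets in a single accumulating loop over permissions[1:10],
-- dispatching each mapped word by i // 3, instead of A's three independent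
-- slice-then-map comprehensions (objective: alternative decomposition, same cost).


-- permission_map[c] / words[c]; total if-chain, exact on Pre_ (other chars raise KeyError in Python, excluded by Pre_)
def pvPermMap (c : Char) : String :=
  if c = 'r' then "read" else if c = 'w' then "write" else if c = 'x' then "execute" else "none"

-- ===== PORT A =====
def parse_permissions_py (permissions : String) : List (String × List String) :=
  let cs := permissions.toList
  [("user",   (PySem.List.slice cs (some 1) (some 4)).map pvPermMap),
   ("group",  (PySem.List.slice cs (some 4) (some 7)).map pvPermMap),
   ("others", (PySem.List.slice cs (some 7) (some 10)).map pvPermMap)]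

-- ===== PORT B =====
-- the loop: state (i, user, group, others); buckets[i // 3] picks the list appended to
-- (i // 3 is 0, 1 or 2 throughout, since the loop runs over at most 9 characters)
def pvBucketLoop (cs : List Char) : Nat × List String × List String × List String :=
  cs.foldl (fun st ch =>
    let w := pvPermMap ch
    if st.1 / 3 = 0 then (st.1 + 1, st.2.1 ++ [w], st.2.2.1, st.2.2.2)
    else if st.1 / 3 = 1 then (st.1 + 1, st.2.1, st.2.2.1 ++ [w], st.2.2.2)
    else (st.1 + 1, st.2.1, st.2.2.1, st.2.2.2 ++ [w])) (0, [], [], [])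

def parse_permissions_py_alt (permissions : String) : List (String × List String) :=
  let st := pvBucketLoop (PySem.List.slice permissions.toList (some 1) (some 10))
  [("user", st.2.1), ("group", st.2.2.1), ("others", st.2.2.2)]

-- ===== PRECONDITION & SPEC =====
-- Pre_ excludes inputs where some character among permissions[1:10] is not one of the map's keys
-- (r, w, x, dash), on which the Python A raises KeyError.
def Pre_parse_permissions_py (permissions : String) : Prop :=
  (((permissions.toList.drop 1).take 9).all (fun c => c = 'r' || c = 'w' || c = 'x' || c = '-')) = true
instance (permissions : String) : Decidable (Pre_parse_permissions_py permissions) := by unfold Pre_parse_permissions_py; infer_instance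
def pvWitness_parse_permissions_py : String := "-rwxr-xr--"
def Spec_parse_permissions_py (permissions : String) (out : List (String × List String)) : Prop := out = parse_permissions_py_alt permissions
instance (permissions : String) (out : List (String × List String)) : Decidable (Spec_parse_permissions_py permissions out) := by unfold Spec_parse_permissions_py; infer_instance

-- ===== CLAIM =====
def Claim_equal_parse_permissions_py : Prop := ∀ (permissions : String), Dom_parse_permissions_py permissions → Pre_parse_permissions_py permissions → Spec_parse_permissions_py permissions (parse_permissions_py permissions)

-- ===== LEMMAS AND PROOFS =====

-- the loop over at most nine characters fills the buckets with the mapped thirds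
lemma pvBucketLoop_take9 (y : List Char) :
    (pvBucketLoop (y.take 9)).2 =
      ((y.take 3).map pvPermMap, ((y.drop 3).take 3).map pvPermMap, ((y.drop 6).take 3).map pvPermMap) := by
  rcases y with _ | ⟨a, _ | ⟨b, _ | ⟨c, _ | ⟨d, _ | ⟨e, _ | ⟨f, _ | ⟨g, _ | ⟨h, _ | ⟨i, t⟩⟩⟩⟩⟩⟩⟩⟩⟩ <;>
    simp [pvBucketLoop]

theorem parse_permissions_py_spec : Claim_equal_parse_permissions_py := by
  intro s _ _
  show _ = _
  simp only [parse_permissions_py, parse_permissions_py_alt]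
  rw [show ((1:Int)) = ((1:Nat):Int) from rfl, show ((4:Int)) = ((4:Nat):Int) from rfl,
      show ((7:Int)) = ((7:Nat):Int) from rfl, show ((10:Int)) = ((10:Nat):Int) from rfl,
      PySem.List.slice_natCast, PySem.List.slice_natCast, PySem.List.slice_natCast,
      PySem.List.slice_natCast, pvBucketLoop_take9]
  simp
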